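-- pv_equiv track=rewrite | github.com/chaseblodgett/Leetcode | num_words_subsequence.py | findNumWords
-- ===== SOURCE A (Python) =====
-- def findNumWords(s, words):
--
--     count = 0
--     for i in range(len(words)):
--         k = 0
--
--         for j in range(len(s)):
--             if k < len(words[i]) and words[i][k] == s[j]:
--                 k += 1
--
--         if k == len(words[i]):
--             count += 1
--
--     return count
-- ===== SOURCE B (Python) =====
-- def findNumWords(s, words):
--     # next-occurrence automaton: tables[i] maps c -> smallest j >= i with s[j] == c
--     nxt = {}
--     tables = [nxt]
--     for i in range(len(s) - 1, -1, -1):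
--         nxt = dict(nxt)
--         nxt[s[i]] = i
--         tables.append(nxt)
--     tables.reverse()
--     count = 0
--     for w in words:
--         pos = 0
--         ok = True
--         for c in w:
--             j = tables[pos].get(c)
--             if j is None:
--                 ok = False
--                 break
--             pos = j + 1
--         count += ok
--     return count
-- ===== Notes on version B (the rewrite author's own statement) =====
-- stated objective: faster
-- what changed: B precomputes a next-occurrence automaton over s (for each position, a map from char to the next index of that char, built back-to-front), so each word is matched by O(1) jumps per character instead of A's full rescan of s per word.
import Mathlib
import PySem

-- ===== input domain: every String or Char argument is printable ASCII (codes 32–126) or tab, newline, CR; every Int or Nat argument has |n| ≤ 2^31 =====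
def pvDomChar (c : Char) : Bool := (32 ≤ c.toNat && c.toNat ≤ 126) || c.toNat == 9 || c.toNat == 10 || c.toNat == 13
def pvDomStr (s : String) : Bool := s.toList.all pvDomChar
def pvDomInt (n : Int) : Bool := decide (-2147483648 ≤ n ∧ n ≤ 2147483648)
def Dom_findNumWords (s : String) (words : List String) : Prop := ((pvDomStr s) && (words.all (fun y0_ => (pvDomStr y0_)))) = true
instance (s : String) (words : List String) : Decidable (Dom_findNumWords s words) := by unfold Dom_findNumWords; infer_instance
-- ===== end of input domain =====

-- B precomputes a next-occurrence automaton over s (per position, char -> next index of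
-- that char, built back-to-front), so each word is matched by O(1) jumps per character
-- instead of A's rescan of all of s per word (objective: faster).

-- ===== PORT A =====
-- literal port of A: outer loop over word indices, inner loop over indices of s
-- advancing a bounded pointer k, then 'if k == len(words[i]): count += 1'
def findNumWords (s : String) (words : List String) : Int :=
  (PySem.List.pyRange 0 (PySem.List.len words) 1).foldl (fun count i =>
    if (PySem.List.pyRange 0 (PySem.List.len s.toList) 1).foldl (fun k j =>
         if k < PySem.List.len (PySem.List.pyGetD words i "").toList ∧
             PySem.List.pyGetD (PySem.List.pyGetD words i "").toList k 'A' =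
               PySem.List.pyGetD s.toList j 'A'
         then k + 1 else k) 0
       = PySem.List.len (PySem.List.pyGetD words i "").toList
    then count + 1 else count) 0

-- ===== PORT B =====
-- tables built back-to-front: Python's reverse loop + append + final reverse is the
-- foldr over enumerate(s); each step copies the later table and overwrites s[i] -> i
def buildTables (s : List Char) : List (PySem.Dict Char Int) :=
  (PySem.List.enumerate s).foldr
    (fun p acc => ((acc.headD PySem.Dict.empty).insert p.2 p.1) :: acc)
    [PySem.Dict.empty]

-- the per-word loop with break: walk the automaton, fail on a missing next occurrence
def matchFrom (tables : List (PySem.Dict Char Int)) : List Char → Int → Bool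
  | [], _ => true
  | c :: rest, pos =>
    match (PySem.List.pyGetD tables pos PySem.Dict.empty).get? c with
    | none => false
    | some j => matchFrom tables rest (j + 1)

def findNumWords_alt (s : String) (words : List String) : Int :=
  let tables := buildTables s.toList
  words.foldl (fun count w => if matchFrom tables w.toList 0 then count + 1 else count) 0

-- ===== PRECONDITION & SPEC =====
def Spec_findNumWords (s : String) (words : List String) (out : Int) : Prop := out = findNumWords_alt s words
instance (s : String) (words : List String) (out : Int) : Decidable (Spec_findNumWords s words out) := by unfold Spec_findNumWords; infer_instance

-- ===== CLAIM (what is proved, stated in full; the proofs are below) =====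
def Claim_equal_findNumWords : Prop := ∀ (s : String) (words : List String), Dom_findNumWords s words → Spec_findNumWords s words (findNumWords s words)

-- ===== LEMMAS AND PROOFS =====

-- ---- A side: the pointer scan matches greedily; it fills the word iff it is a subsequence ----

-- one step of A's inner loop: advance the bounded pointer k on char c
def stepW (w : List Char) (k : Int) (c : Char) : Int :=
  if k < PySem.List.len w ∧ PySem.List.pyGetD w k 'A' = c then k + 1 else k

-- A's per-word result: fold the pointer over all of s
def scanW (w : List Char) (cs : List Char) : Int := cs.foldl (stepW w) 0

-- the same greedy scan, tracked as the still-unmatched suffix of the word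
def gstep : List Char → Char → List Char
  | [], _ => []
  | a :: r, c => if a = c then r else a :: r

def grem (rem : List Char) (cs : List Char) : List Char := cs.foldl gstep rem

lemma scan_sum : ∀ (cs w : List Char) (k : Nat), k ≤ w.length →
    cs.foldl (stepW w) (k : Int) = (w.length : Int) - ((grem (w.drop k) cs).length : Int) := by
  intro cs
  induction cs with
  | nil =>
    intro w k hk
    simp [grem]
    omega
  | cons c cs ih =>
    intro w k hk
    have hstep : stepW w (k : Int) c =
        if k < w.length ∧ w.getD k 'A' = c then ((k : Int) + 1) else (k : Int) := by
      simp [stepW]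
    have hgrem : grem (w.drop k) (c :: cs) = grem (gstep (w.drop k) c) cs := rfl
    have hfold : (c :: cs).foldl (stepW w) (k : Int)
        = cs.foldl (stepW w) (stepW w (k : Int) c) := rfl
    by_cases hlt : k < w.length
    · have hdrop : w.drop k = w[k] :: w.drop (k + 1) := List.drop_eq_getElem_cons hlt
      by_cases hc : w[k] = c
      · have h1 : stepW w (k : Int) c = ((k + 1 : Nat) : Int) := by
          rw [hstep, if_pos ⟨hlt, by rw [List.getD_eq_getElem w 'A' hlt]; exact hc⟩]
          push_cast; ring
        have h2 : gstep (w.drop k) c = w.drop (k + 1) := by rw [hdrop]; simp [gstep, hc]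
        rw [hfold, h1, hgrem, h2]
        exact ih w (k + 1) hlt
      · have h1 : stepW w (k : Int) c = (k : Int) := by
          rw [hstep, if_neg]
          rw [List.getD_eq_getElem w 'A' hlt]
          tauto
        have h2 : gstep (w.drop k) c = w.drop k := by
          rw [hdrop]; simp [gstep, hc]
        rw [hfold, h1, hgrem, h2]
        exact ih w k hk
    · have hk' : k = w.length := by omega
      have hdrop : w.drop k = [] := by simp [hk']
      have h1 : stepW w (k : Int) c = (k : Int) := by rw [hstep, if_neg]; tauto
      have h2 : gstep (w.drop k) c = w.drop k := by rw [hdrop]; simp [gstep]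
      rw [hfold, h1, hgrem, h2]
      exact ih w k hk

lemma cons_sublist_cons_of_ne {a c : Char} (l t : List Char) (h : a ≠ c) :
    (a :: l).Sublist (c :: t) ↔ (a :: l).Sublist t := by
  constructor
  · intro hs
    cases hs with
    | cons _ h' => exact h'
    | cons₂ => exact absurd rfl h
  · intro hs
    exact hs.cons c

lemma grem_nil_iff : ∀ (cs w : List Char), grem w cs = [] ↔ w.Sublist cs := by
  intro cs
  induction cs with
  | nil =>
    intro w
    simp [grem, List.sublist_nil]
  | cons c cs ih =>
    intro w
    have hg : ∀ rem : List Char, grem rem (c :: cs) = grem (gstep rem c) cs := fun _ => rfl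
    cases w with
    | nil =>
      rw [hg, (by simp [gstep] : gstep [] c = [])]
      simp [ih]
    | cons a w' =>
      by_cases hac : a = c
      · subst hac
        rw [hg, (by simp [gstep] : gstep (a :: w') a = w'), ih,
            List.cons_sublist_cons]
      · rw [hg, (by simp [gstep, hac] : gstep (a :: w') c = a :: w'), ih,
            cons_sublist_cons_of_ne _ _ hac]

lemma scan_iff (w s : List Char) :
    (scanW w s = PySem.List.len w) ↔ w.Sublist s := by
  have h := scan_sum s w 0 (Nat.zero_le _)
  simp only [Nat.cast_zero, List.drop_zero] at h
  rw [scanW, h, PySem.List.len_eq]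
  rw [← grem_nil_iff s w, ← List.length_eq_zero_iff]
  omega

lemma A_eq (s : String) (words : List String) :
    findNumWords s words
      = (words.countP (fun w => decide (scanW w.toList s.toList = PySem.List.len w.toList)) : Int) := by
  unfold findNumWords
  rw [PySem.List.foldl_pyRange_zero_pyGetD words ""
        (fun count w =>
          if (PySem.List.pyRange 0 (PySem.List.len s.toList) 1).foldl (fun k j =>
               if k < PySem.List.len w.toList ∧
                   PySem.List.pyGetD w.toList k 'A' = PySem.List.pyGetD s.toList j 'A'
               then k + 1 else k) 0
             = PySem.List.len w.toList
          then count + 1 else count) 0]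
  have hw : ∀ (count : Int) (w : String), w ∈ words →
      (if (PySem.List.pyRange 0 (PySem.List.len s.toList) 1).foldl (fun k j =>
            if k < PySem.List.len w.toList ∧
                PySem.List.pyGetD w.toList k 'A' = PySem.List.pyGetD s.toList j 'A'
            then k + 1 else k) 0
          = PySem.List.len w.toList
       then count + 1 else count)
        = (if scanW w.toList s.toList = PySem.List.len w.toList then count + 1 else count) := by
    intro count w _
    rw [PySem.List.foldl_pyRange_zero_pyGetD s.toList 'A'
          (fun k c =>
            if k < PySem.List.len w.toList ∧ PySem.List.pyGetD w.toList k 'A' = c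
            then k + 1 else k) 0]
    rfl
  rw [PySem.List.foldl_congr_mem words _ _ 0 hw]
  have hsum := PySem.List.foldl_ite_add_one
      (fun w : String => scanW w.toList s.toList = PySem.List.len w.toList) words 0
  rw [hsum]
  simp

-- ---- B side: the automaton tables give the next occurrence; walking them is subsequence test ----

-- the backwards build, as structural recursion (one table per suffix of s)
def T : List Char → Int → List (PySem.Dict Char Int)
  | [], _ => [PySem.Dict.empty]
  | a :: s, i => ((T s (i + 1)).headD PySem.Dict.empty).insert a i :: T s (i + 1)

def Hd (s : List Char) (i : Int) : PySem.Dict Char Int := (T s i).headD PySem.Dict.empty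

lemma buildTables_eq_T : ∀ (s : List Char) (i : Int),
    (PySem.List.enumerate s i).foldr
      (fun p acc => ((acc.headD PySem.Dict.empty).insert p.2 p.1) :: acc)
      [PySem.Dict.empty] = T s i := by
  intro s
  induction s with
  | nil => intro i; simp [PySem.List.enumerate_nil, T]
  | cons a s ih =>
    intro i
    rw [PySem.List.enumerate_cons]
    simp only [List.foldr_cons, ih (i + 1)]
    rfl

lemma T_getD : ∀ (s : List Char) (i : Int) (p : Nat), p ≤ s.length →
    (T s i).getD p PySem.Dict.empty = Hd (s.drop p) (i + p) := by
  intro s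
  induction s with
  | nil =>
    intro i p hp
    have hp0 : p = 0 := by simpa using hp
    subst hp0
    simp [T, Hd]
  | cons a s ih =>
    intro i p hp
    cases p with
    | zero => simp [T, Hd]
    | succ q =>
      have hq : q ≤ s.length := by simpa using hp
      have := ih (i + 1) q hq
      simp only [T, List.getD_cons_succ, List.drop_succ_cons]
      rw [this]
      congr 1
      push_cast
      ring

lemma Hd_get? : ∀ (s : List Char) (i : Int) (c : Char),
    (Hd s i).get? c = (s.findIdx? (fun x => x == c)).map (fun (r : Nat) => i + (r : Int)) := by
  intro s
  induction s with
  | nil => intro i c; simp [Hd, T, PySem.Dict.get?_empty]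
  | cons a s ih =>
    intro i c
    have hcons : Hd (a :: s) i = (Hd s (i + 1)).insert a i := rfl
    rw [hcons, PySem.Dict.get?_insert, List.findIdx?_cons]
    by_cases hca : c = a
    · simp [hca]
    · have hac : (a == c) = false := by simp; exact fun h => hca h.symm
      rw [if_neg hca, if_neg (by simp [hac]), ih]
      cases hf : s.findIdx? (fun x => x == c) <;> simp
      omega

lemma not_sublist_of_findIdx?_none (t : List Char) (c : Char) (rest : List Char)
    (h : t.findIdx? (fun x => x == c) = none) : ¬ (c :: rest).Sublist t := by
  intro hs
  have hc : c ∈ t := hs.subset (List.mem_cons_self)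
  have := (List.findIdx?_eq_none_iff.mp h) c hc
  simp at this

lemma greedy_iff : ∀ (t : List Char) (c : Char) (rest : List Char) (r : Nat),
    t.findIdx? (fun x => x == c) = some r →
    ((c :: rest).Sublist t ↔ rest.Sublist (t.drop (r + 1))) := by
  intro t
  induction t with
  | nil => intro c rest r h; simp at h
  | cons a t ih =>
    intro c rest r h
    rw [List.findIdx?_cons] at h
    by_cases hac : a = c
    · rw [if_pos (by simp [hac])] at h
      have hr : r = 0 := by simpa using h.symm
      subst hr; subst hac
      simp [List.cons_sublist_cons]
    · rw [if_neg (by simp [hac])] at h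
      obtain ⟨r', hf, hr⟩ := Option.map_eq_some_iff.mp h
      subst hr
      rw [cons_sublist_cons_of_ne _ _ (fun hc => hac hc.symm)]
      simpa using ih c rest r' hf

lemma matchFrom_iff (s : List Char) : ∀ (w : List Char) (p : Nat), p ≤ s.length →
    (matchFrom (T s 0) w (p : Int) = true ↔ w.Sublist (s.drop p)) := by
  intro w
  induction w with
  | nil => intro p hp; simp [matchFrom]
  | cons c rest ih =>
    intro p hp
    have hget : PySem.List.pyGetD (T s 0) (p : Int) PySem.Dict.empty = Hd (s.drop p) p := by
      rw [PySem.List.pyGetD_natCast, T_getD s 0 p hp]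
      simp
    rw [matchFrom, hget, Hd_get?]
    cases hf : (s.drop p).findIdx? (fun x => x == c) with
    | none =>
      simp only [Option.map_none]
      simpa using not_sublist_of_findIdx?_none _ c rest hf
    | some r =>
      have hr : r < (s.drop p).length := (List.findIdx?_eq_some_iff_findIdx_eq.mp hf).1
      have hle : p + r + 1 ≤ s.length := by
        rw [List.length_drop] at hr; omega
      have hcast : ((p : Int) + (r : Int)) + 1 = ((p + r + 1 : Nat) : Int) := by push_cast; ring
      simp only [Option.map_some]
      rw [hcast, ih (p + r + 1) hle]
      have hdd : s.drop (p + r + 1) = (s.drop p).drop (r + 1) := by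
        rw [List.drop_drop]; ring_nf
      rw [hdd]
      exact (greedy_iff (s.drop p) c rest r hf).symm

lemma B_eq (s : String) (words : List String) :
    findNumWords_alt s words
      = (words.countP (fun w => matchFrom (T s.toList 0) w.toList 0) : Int) := by
  unfold findNumWords_alt buildTables
  rw [buildTables_eq_T]
  have := PySem.List.foldl_ite_add_one
      (fun w : String => matchFrom (T s.toList 0) w.toList 0 = true) words 0
  simp only [this]
  simp

-- ===== VERDICT (by name: the statement is the Claim_ definition above) =====
theorem findNumWords_spec : Claim_equal_findNumWords := by
  intro s words _
  unfold Spec_findNumWords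
  rw [A_eq, B_eq]
  congr 1
  apply List.countP_congr
  intro w _
  have h1 := scan_iff w.toList s.toList
  have h2 := matchFrom_iff s.toList w.toList 0 (Nat.zero_le _)
  simp only [List.drop_zero, Nat.cast_zero] at h2
  rw [decide_eq_true_eq]
  exact h1.trans h2.symm
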